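-- pv_equiv track=rewrite | github.com/Zipstack/visitran | backend/backend/application/validate_mro.py | detect_and_fix_mro_issues
-- ===== SOURCE A (Python) =====
-- def detect_and_fix_mro_issues(no_code_model: dict[str, list[str]]) -> dict[str, list[str]]:
--     # Create reverse lookup (used for transitive dependency detection)
--     def get_all_bases(cls_name: str, visited=None) -> set[str]:
--         visited = visited or set()
--         if cls_name in visited:
--             return set()
--         visited.add(cls_name)
--         base_models = no_code_model.get(cls_name, set())
--         all_bases = set(base_models)
--         for base_model in base_models:
--             all_bases.update(get_all_bases(base_model, visited))
--         return all_bases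
--
--     for name, bases in no_code_model.items():
--         # Detect indirect (transitive) bases
--         transitive_bases = set()
--         for base in bases:
--             transitive_bases.update(get_all_bases(base))
--
--         # Remove any base already covered by another base (transitive dependency)
--         valid_bases = [base for base in bases if base not in transitive_bases]
--
--         no_code_model[name] = valid_bases
--
--     return no_code_model
-- ===== SOURCE B (Python) =====
-- def detect_and_fix_mro_issues(no_code_model: dict[str, list[str]]) -> dict[str, list[str]]:
--     # One multi-source worklist traversal per class (instead of a fresh recursive
--     # DFS per base): every node reachable from the bases is expanded exactly once.
--     for name, bases in no_code_model.items():
--         visited = set()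
--         transitive = set()
--         queue = list(bases)
--         i = 0
--         while i < len(queue):
--             node = queue[i]
--             i += 1
--             if node in visited:
--                 continue
--             visited.add(node)
--             for nb in no_code_model.get(node, ()):
--                 transitive.add(nb)
--                 queue.append(nb)
--         no_code_model[name] = [b for b in bases if b not in transitive]
--     return no_code_model
-- ===== Notes on version B (the rewrite author's own statement) =====
-- stated objective: faster
-- what changed: Per class, A launches a fresh recursive DFS (with its own visited set) for every base and unions the results; B replaces all of these by a single iterative multi-source worklist traversal that expands each reachable node exactly once, collecting the transitive base set in one pass.
import Mathlib
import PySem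

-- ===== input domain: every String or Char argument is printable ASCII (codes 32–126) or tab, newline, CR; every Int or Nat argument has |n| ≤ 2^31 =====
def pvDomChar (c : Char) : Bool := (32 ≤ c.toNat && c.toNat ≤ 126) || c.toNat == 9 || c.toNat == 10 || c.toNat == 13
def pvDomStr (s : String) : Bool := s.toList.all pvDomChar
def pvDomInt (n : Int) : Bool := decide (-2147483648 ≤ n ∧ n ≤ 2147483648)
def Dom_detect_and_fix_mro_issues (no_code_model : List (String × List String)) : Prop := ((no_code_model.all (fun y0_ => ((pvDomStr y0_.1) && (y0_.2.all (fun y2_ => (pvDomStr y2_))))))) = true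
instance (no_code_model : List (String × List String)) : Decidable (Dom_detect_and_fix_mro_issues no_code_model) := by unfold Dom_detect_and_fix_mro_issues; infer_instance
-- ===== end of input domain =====

-- B replaces A's per-base recursive DFS re-traversals by one multi-source worklist
-- traversal per class (objective: faster, constant-factor; both mutate the dict in
-- place in Python — the equivalence proved here is about the returned mapping).


-- no_code_model.get(x, set()) of both Pythons (empty iterable when the key is absent)
def pvNbrs (m : PySem.Dict String (List String)) (x : String) : List String :=
  (PySem.Dict.get? m x).getD []

-- ===== PORT A =====
-- fuel bound for the recursion of get_all_bases (totality guard only: the proof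
-- shows it is never exhausted — DFS depth is bounded by the number of base names)
def pvFuelA (m : PySem.Dict String (List String)) : Nat :=
  ((PySem.Dict.values m).flatten).length + 2

mutual
-- get_all_bases(cls_name, visited): returns (visited after the call, result set);
-- the shared mutable `visited` is threaded through explicitly
def pvGaA (m : PySem.Dict String (List String)) :
    Nat → String → PySem.Set String → PySem.Set String × PySem.Set String
  | 0, _, visited => (visited, PySem.Set.empty)
  | fuel + 1, cls, visited =>
    if PySem.Set.contains visited cls then (visited, PySem.Set.empty)
    else pvGaListA m fuel (pvNbrs m cls) (PySem.Set.add visited cls)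
           (PySem.Set.ofList (pvNbrs m cls))
  termination_by f _ _ => (f, 0)
  decreasing_by all_goals simp_wf <;> omega
-- the `for base_model in base_models: all_bases.update(get_all_bases(base_model, visited))` loop
def pvGaListA (m : PySem.Dict String (List String)) :
    Nat → List String → PySem.Set String → PySem.Set String → PySem.Set String × PySem.Set String
  | _, [], visited, acc => (visited, acc)
  | fuel, b :: bs, visited, acc =>
    let r := pvGaA m fuel b visited
    pvGaListA m fuel bs r.1 (PySem.Set.union acc r.2)
  termination_by f bs _ _ => (f, bs.length + 1)
  decreasing_by all_goals simp_wf <;> omega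
end

def detect_and_fix_mro_issues (no_code_model : List (String × List String)) : List (String × List String) :=
  ((no_code_model.map Prod.fst).foldl
    (fun (m : PySem.Dict String (List String)) name =>
      let bases := (PySem.Dict.get? m name).getD []
      let tb := bases.foldl
        (fun tb b => PySem.Set.union tb (pvGaA m (pvFuelA m) b PySem.Set.empty).2)
        PySem.Set.empty
      PySem.Dict.insert m name (bases.filter (fun b => !(PySem.Set.contains tb b))))
    ⟨no_code_model⟩).items

-- ===== PORT B =====
-- fuel bound for B's while loop (totality guard only; never exhausted)
def pvFuelB (m : PySem.Dict String (List String)) (bases : List String) : Nat :=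
  bases.length + ((PySem.Dict.values m).flatten).length * ((PySem.Dict.values m).flatten).length + 2

-- the `while i < len(queue)` worklist loop of B: queue, visited, transitive
def pvWalkB (m : PySem.Dict String (List String)) :
    Nat → List String → PySem.Set String → PySem.Set String → PySem.Set String
  | 0, _, _, t => t
  | _ + 1, [], _, t => t
  | fuel + 1, node :: rest, visited, t =>
    if PySem.Set.contains visited node then pvWalkB m fuel rest visited t
    else pvWalkB m fuel (rest ++ pvNbrs m node) (PySem.Set.add visited node)
           (PySem.Set.update t (pvNbrs m node))

def detect_and_fix_mro_issues_alt (no_code_model : List (String × List String)) : List (String × List String) :=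
  ((no_code_model.map Prod.fst).foldl
    (fun (m : PySem.Dict String (List String)) name =>
      let bases := (PySem.Dict.get? m name).getD []
      let tb := pvWalkB m (pvFuelB m bases) bases PySem.Set.empty PySem.Set.empty
      PySem.Dict.insert m name (bases.filter (fun b => !(PySem.Set.contains tb b))))
    ⟨no_code_model⟩).items

-- ===== PRECONDITION & SPEC =====
def Spec_detect_and_fix_mro_issues (no_code_model : List (String × List String)) (out : List (String × List String)) : Prop := out = detect_and_fix_mro_issues_alt no_code_model
instance (no_code_model : List (String × List String)) (out : List (String × List String)) : Decidable (Spec_detect_and_fix_mro_issues no_code_model out) := by unfold Spec_detect_and_fix_mro_issues; infer_instance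

-- ===== CLAIM (what is proved, stated in full; the proofs are below) =====
def Claim_equal_detect_and_fix_mro_issues : Prop := ∀ (no_code_model : List (String × List String)), Dom_detect_and_fix_mro_issues no_code_model → Spec_detect_and_fix_mro_issues no_code_model (detect_and_fix_mro_issues no_code_model)

-- ===== LEMMAS AND PROOFS =====

-- reachability in ≥ 0 steps from c along pvNbrs edges, all visited nodes avoiding B
inductive pvRA (m : PySem.Dict String (List String)) (B : List String) : String → String → Prop
  | refl (c : String) : c ∉ B → pvRA m B c c
  | tail {c x y : String} : pvRA m B c x → y ∈ pvNbrs m x → y ∉ B → pvRA m B c y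

theorem pvRA_mono {m : PySem.Dict String (List String)} {B B' : List String}
    (h : ∀ a, a ∈ B → a ∈ B') {c y : String} (hr : pvRA m B' c y) : pvRA m B c y := by
  induction hr with
  | refl hc => exact pvRA.refl _ (fun hc' => hc (h _ hc'))
  | tail _ hy hyB ih => exact pvRA.tail ih hy (fun hy' => hyB (h _ hy'))

theorem pvRA_congr {m : PySem.Dict String (List String)} {B B' : List String}
    (h : ∀ a, a ∈ B ↔ a ∈ B') {c y : String} : pvRA m B c y ↔ pvRA m B' c y :=
  ⟨pvRA_mono (fun a ha => (h a).mpr ha), pvRA_mono (fun a ha => (h a).mp ha)⟩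

theorem pvRA_start {m : PySem.Dict String (List String)} {B : List String} {c y : String}
    (hr : pvRA m B c y) : c ∉ B := by
  induction hr with
  | refl hc => exact hc
  | tail _ _ _ ih => exact ih

theorem pvRA_end {m : PySem.Dict String (List String)} {B : List String} {c y : String}
    (hr : pvRA m B c y) : y ∉ B := by
  cases hr with
  | refl hc => exact hc
  | tail _ _ hyB => exact hyB

theorem pvRA_trans {m : PySem.Dict String (List String)} {B : List String} {c x y : String}
    (h1 : pvRA m B c x) (h2 : pvRA m B x y) : pvRA m B c y := by
  induction h2 with
  | refl _ => exact h1
  | tail _ hy hyB ih => exact pvRA.tail ih hy hyB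

theorem pvRA_avoid {m : PySem.Dict String (List String)} {B : List String} (n : String)
    {c y : String} (hr : pvRA m B c y) :
    y = n ∨ pvRA m (n :: B) c y ∨ ∃ d, d ∈ pvNbrs m n ∧ pvRA m (n :: B) d y := by
  induction hr with
  | refl hc =>
    by_cases hcn : c = n
    · exact Or.inl hcn
    · exact Or.inr (Or.inl (pvRA.refl c (by simp [hcn, hc])))
  | tail hcx hy hyB ih =>
    rename_i x' y'
    by_cases hyn : y' = n
    · exact Or.inl hyn
    · have hyB' : y' ∉ n :: B := by simp [hyn, hyB]
      rcases ih with hx | hx | ⟨d, hd, hx⟩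
      · subst hx
        exact Or.inr (Or.inr ⟨y', hy, pvRA.refl y' hyB'⟩)
      · exact Or.inr (Or.inl (pvRA.tail hx hy hyB'))
      · exact Or.inr (Or.inr ⟨d, hd, pvRA.tail hx hy hyB'⟩)

theorem pvRA_absorb {m : PySem.Dict String (List String)} {v v' : List String} {b : String}
    (hv' : ∀ a, a ∈ v' ↔ a ∈ v ∨ pvRA m v b a) {c y : String}
    (hr : pvRA m v c y) : y ∈ v' ∨ pvRA m v' c y := by
  induction hr with
  | refl hc =>
    by_cases hc' : c ∈ v'
    · exact Or.inl hc'
    · exact Or.inr (pvRA.refl c hc')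
  | tail hcx hy hyB ih =>
    rename_i x' y'
    by_cases hy' : y' ∈ v'
    · exact Or.inl hy'
    · refine Or.inr ?_
      rcases ih with hx | hx
      · rcases (hv' x').mp hx with hxv | hxb
        · exact absurd hxv (pvRA_end hcx)
        · exact absurd ((hv' y').mpr (Or.inr (pvRA.tail hxb hy hyB))) hy'
      · exact pvRA.tail hx hy hy'

-- membership of a dict value list in the flattened values
theorem pvGet?_mem_values {m : PySem.Dict String (List String)} {x : String} {l : List String}
    (h : PySem.Dict.get? m x = some l) : l ∈ PySem.Dict.values m := by
  obtain ⟨items⟩ := m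
  induction items with
  | nil => simp [PySem.Dict.get?] at h
  | cons p rest ih =>
    rw [PySem.Dict.get?_mk_cons] at h
    by_cases hpx : (p.1 == x) = true
    · simp [hpx] at h
      subst h
      simp [PySem.Dict.values]
    · simp [hpx] at h
      have := ih h
      simp [PySem.Dict.values] at this ⊢
      exact Or.inr this

theorem pvNbrs_subset {m : PySem.Dict String (List String)} {x y : String}
    (h : y ∈ pvNbrs m x) : y ∈ (PySem.Dict.values m).flatten := by
  unfold pvNbrs at h
  cases hg : PySem.Dict.get? m x with
  | none => simp [hg] at h
  | some l =>
    rw [hg] at h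
    simp only [Option.getD_some] at h
    exact List.mem_flatten.mpr ⟨l, pvGet?_mem_values hg, h⟩

theorem pvNbrs_len_le (m : PySem.Dict String (List String)) (x : String) :
    (pvNbrs m x).length ≤ ((PySem.Dict.values m).flatten).length := by
  unfold pvNbrs
  cases hg : PySem.Dict.get? m x with
  | none => simp
  | some l =>
    simp only [Option.getD_some]
    have hl : l ∈ PySem.Dict.values m := pvGet?_mem_values hg
    calc l.length ≤ ((PySem.Dict.values m).map List.length).sum := by
              exact List.single_le_sum (by simp) _ (List.mem_map_of_mem hl)
      _ = ((PySem.Dict.values m).flatten).length := by rw [List.length_flatten]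

-- the finset of all base names occurring among the values
def pvV (m : PySem.Dict String (List String)) : Finset String :=
  ((PySem.Dict.values m).flatten).toFinset

-- ===== A side: DFS correctness =====

theorem pvGaListA_spec (m : PySem.Dict String (List String)) (f : Nat)
    (HQ : ∀ (cls : String) (v : PySem.Set String),
      ((insert cls (pvV m)) \ v.toFinset).card < f →
      (∀ y, y ∈ (pvGaA m f cls v).1 ↔ y ∈ v ∨ pvRA m v cls y) ∧
      (∀ z, z ∈ (pvGaA m f cls v).2 ↔ ∃ y, pvRA m v cls y ∧ z ∈ pvNbrs m y)) :
    ∀ (bs : List String) (v acc : PySem.Set String),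
      (∀ b ∈ bs, b ∈ (PySem.Dict.values m).flatten) →
      ((pvV m) \ v.toFinset).card < f →
      (∀ y, y ∈ (pvGaListA m f bs v acc).1 ↔ y ∈ v ∨ ∃ b ∈ bs, pvRA m v b y) ∧
      (∀ z, z ∈ (pvGaListA m f bs v acc).2 ↔
        z ∈ acc ∨ ∃ b ∈ bs, ∃ y, pvRA m v b y ∧ z ∈ pvNbrs m y) := by
  intro bs
  induction bs with
  | nil => intro v acc _ _; simp [pvGaListA]
  | cons b bs ih =>
    intro v acc hbs hf
    have hbV : ((insert b (pvV m)) \ v.toFinset).card < f := by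
      rw [Finset.insert_eq_self.mpr (by unfold pvV; exact List.mem_toFinset.mpr (hbs b (by simp)))]
      exact hf
    obtain ⟨h1, h2⟩ := HQ b v hbV
    set r := pvGaA m f b v with hr
    have hsubv : ∀ a, a ∈ v → a ∈ r.1 := fun a ha => (h1 a).mpr (Or.inl ha)
    have hcard : ((pvV m) \ r.1.toFinset).card < f := by
      refine lt_of_le_of_lt (Finset.card_le_card (Finset.sdiff_subset_sdiff (Finset.Subset.refl _) ?_)) hf
      intro a ha
      exact List.mem_toFinset.mpr (hsubv a (List.mem_toFinset.mp ha))
    obtain ⟨g1, g2⟩ := ih r.1 (PySem.Set.union acc r.2)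
      (fun b' hb' => hbs b' (by simp [hb'])) hcard
    have heq : pvGaListA m f (b :: bs) v acc = pvGaListA m f bs r.1 (PySem.Set.union acc r.2) := by
      simp only [pvGaListA]
      rw [← hr]
    rw [heq]
    constructor
    · intro y
      rw [g1 y]
      constructor
      · rintro (h | ⟨b', hb', hra⟩)
        · rcases (h1 y).mp h with hv | hra
          · exact Or.inl hv
          · exact Or.inr ⟨b, by simp, hra⟩
        · exact Or.inr ⟨b', by simp [hb'], pvRA_mono hsubv hra⟩
      · rintro (hv | ⟨b', hb', hra⟩)
        · exact Or.inl (hsubv y hv)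
        · rcases List.mem_cons.mp hb' with heqb | hb''
          · exact Or.inl ((h1 y).mpr (Or.inr (heqb ▸ hra)))
          · rcases pvRA_absorb h1 hra with hy | hy
            · exact Or.inl hy
            · exact Or.inr ⟨b', hb'', hy⟩
    · intro z
      rw [g2 z, PySem.Set.mem_union]
      constructor
      · rintro ((ha | hr2) | ⟨b', hb', y, hra, hz⟩)
        · exact Or.inl ha
        · obtain ⟨y, hra, hz⟩ := (h2 z).mp hr2
          exact Or.inr ⟨b, by simp, y, hra, hz⟩
        · exact Or.inr ⟨b', by simp [hb'], y, pvRA_mono hsubv hra, hz⟩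
      · rintro (ha | ⟨b', hb', y, hra, hz⟩)
        · exact Or.inl (Or.inl ha)
        · rcases List.mem_cons.mp hb' with heqb | hb''
          · exact Or.inl (Or.inr ((h2 z).mpr ⟨y, heqb ▸ hra, hz⟩))
          · rcases pvRA_absorb h1 hra with hy | hy
            · rcases (h1 y).mp hy with hyv | hyb
              · exact absurd hyv (pvRA_end hra)
              · exact Or.inl (Or.inr ((h2 z).mpr ⟨y, hyb, hz⟩))
            · exact Or.inr ⟨b', hb'', y, hy, hz⟩

theorem pvGaA_spec (m : PySem.Dict String (List String)) :
    ∀ (fuel : Nat) (cls : String) (v : PySem.Set String),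
      ((insert cls (pvV m)) \ v.toFinset).card < fuel →
      (∀ y, y ∈ (pvGaA m fuel cls v).1 ↔ y ∈ v ∨ pvRA m v cls y) ∧
      (∀ z, z ∈ (pvGaA m fuel cls v).2 ↔ ∃ y, pvRA m v cls y ∧ z ∈ pvNbrs m y) := by
  intro fuel
  induction fuel with
  | zero => intro cls v hf; omega
  | succ f ih =>
    intro cls v hf
    by_cases hvc : PySem.Set.contains v cls = true
    · have hclsv : cls ∈ v := (PySem.Set.contains_iff v cls).mp hvc
      have heq : pvGaA m (f + 1) cls v = (v, PySem.Set.empty) := by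
        simp only [pvGaA, if_pos hvc]
      rw [heq]
      constructor
      · intro y
        simp only []
        constructor
        · exact Or.inl
        · rintro (hy | hra)
          · exact hy
          · exact absurd hclsv (pvRA_start hra)
      · intro z
        constructor
        · intro h; exact absurd h (by simp [PySem.Set.empty])
        · rintro ⟨y, hra, _⟩; exact absurd hclsv (pvRA_start hra)
    · have hclsv : cls ∉ v := fun h => hvc ((PySem.Set.contains_iff v cls).mpr h)
      have heq : pvGaA m (f + 1) cls v =
          pvGaListA m f (pvNbrs m cls) (PySem.Set.add v cls)
            (PySem.Set.ofList (pvNbrs m cls)) := by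
        simp only [pvGaA, if_neg hvc]
      have hvset : ∀ a, a ∈ (PySem.Set.add v cls).toFinset ↔ a ∈ insert cls v.toFinset := by
        intro a
        simp only [List.mem_toFinset, PySem.Set.mem_add, Finset.mem_insert]
        tauto
      have hsub : pvV m \ (PySem.Set.add v cls).toFinset ⊆
          ((insert cls (pvV m)) \ v.toFinset).erase cls := by
        intro a ha
        rcases Finset.mem_sdiff.mp ha with ⟨haV, hav⟩
        have := (hvset a).not.mp hav
        simp only [Finset.mem_insert, not_or, List.mem_toFinset] at this
        refine Finset.mem_erase.mpr ⟨this.1, Finset.mem_sdiff.mpr ⟨by simp [haV], ?_⟩⟩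
        simp [List.mem_toFinset, this.2]
      have hclsmem : cls ∈ (insert cls (pvV m)) \ v.toFinset := by
        simp [List.mem_toFinset, hclsv]
      have hc2 : ((pvV m) \ (PySem.Set.add v cls).toFinset).card < f := by
        have h1 := Finset.card_le_card hsub
        rw [Finset.card_erase_of_mem hclsmem] at h1
        have h2 := Finset.card_pos.mpr ⟨cls, hclsmem⟩
        omega
      obtain ⟨g1, g2⟩ := pvGaListA_spec m f ih (pvNbrs m cls) (PySem.Set.add v cls)
        (PySem.Set.ofList (pvNbrs m cls)) (fun b hb => pvNbrs_subset hb) hc2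
      have hBc : ∀ a, a ∈ PySem.Set.add v cls ↔ a ∈ cls :: v := by
        intro a; rw [PySem.Set.mem_add]; simp; tauto
      rw [heq]
      constructor
      · intro y
        rw [g1 y]
        constructor
        · rintro (hy | ⟨b, hb, hra⟩)
          · rcases (PySem.Set.mem_add v cls y).mp hy with h | heqy
            · exact Or.inl h
            · exact Or.inr (by rw [heqy]; exact pvRA.refl cls hclsv)
          · have hra' : pvRA m v b y :=
              pvRA_mono (fun a ha => (PySem.Set.mem_add v cls a).mpr (Or.inl ha)) hra
            have hbv : b ∉ v := fun hbv' =>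
              (pvRA_start hra) ((PySem.Set.mem_add v cls b).mpr (Or.inl hbv'))
            exact Or.inr (pvRA_trans (pvRA.tail (pvRA.refl cls hclsv) hb hbv) hra')
        · rintro (hyv | hra)
          · exact Or.inl ((PySem.Set.mem_add v cls y).mpr (Or.inl hyv))
          · rcases pvRA_avoid cls hra with heqy | h2 | ⟨d, hd, h2⟩
            · exact Or.inl ((PySem.Set.mem_add v cls y).mpr (Or.inr heqy))
            · exact absurd (pvRA_start h2) (by simp)
            · exact Or.inr ⟨d, hd, (pvRA_congr hBc).mpr h2⟩
      · intro z
        rw [g2 z, PySem.Set.mem_ofList]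
        constructor
        · rintro (hz | ⟨b, hb, y, hra, hz⟩)
          · exact ⟨cls, pvRA.refl cls hclsv, hz⟩
          · have hra' : pvRA m v b y :=
              pvRA_mono (fun a ha => (PySem.Set.mem_add v cls a).mpr (Or.inl ha)) hra
            have hbv : b ∉ v := fun hbv' =>
              (pvRA_start hra) ((PySem.Set.mem_add v cls b).mpr (Or.inl hbv'))
            exact ⟨y, pvRA_trans (pvRA.tail (pvRA.refl cls hclsv) hb hbv) hra', hz⟩
        · rintro ⟨y, hra, hz⟩
          rcases pvRA_avoid cls hra with heqy | h2 | ⟨d, hd, h2⟩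
          · rw [heqy] at hz
            exact Or.inl hz
          · exact absurd (pvRA_start h2) (by simp)
          · exact Or.inr ⟨d, hd, y, (pvRA_congr hBc).mpr h2, hz⟩

-- ===== B side: worklist correctness =====

def pvPot (m : PySem.Dict String (List String)) (v : PySem.Set String) : Nat :=
  ∑ x ∈ (pvV m \ v.toFinset), (pvNbrs m x).length

theorem pvWalkB_spec (m : PySem.Dict String (List String)) :
    ∀ (fuel : Nat) (queue : List String) (v t : PySem.Set String),
      (∀ q ∈ queue, q ∈ (PySem.Dict.values m).flatten) →
      queue.length + pvPot m v < fuel →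
      ∀ z, z ∈ pvWalkB m fuel queue v t ↔
        z ∈ t ∨ ∃ s ∈ queue, ∃ y, pvRA m v s y ∧ z ∈ pvNbrs m y := by
  intro fuel
  induction fuel with
  | zero => intro queue v t hq hf; omega
  | succ f ih =>
    intro queue v t hq hf z
    match queue with
    | [] => simp [pvWalkB]
    | node :: rest =>
      have hnode_vals : node ∈ (PySem.Dict.values m).flatten := hq node (by simp)
      by_cases hvn : PySem.Set.contains v node = true
      · have heq : pvWalkB m (f + 1) (node :: rest) v t = pvWalkB m f rest v t := by
          simp only [pvWalkB, if_pos hvn]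
        have hf' : rest.length + pvPot m v < f := by
          simp only [List.length_cons] at hf; omega
        rw [heq, ih rest v t (fun q hq' => hq q (by simp [hq'])) hf' z]
        have hnv : node ∈ v := (PySem.Set.contains_iff v node).mp hvn
        constructor
        · rintro (h | ⟨s, hs, hy⟩)
          · exact Or.inl h
          · exact Or.inr ⟨s, by simp [hs], hy⟩
        · rintro (h | ⟨s, hs, y, hra, hz⟩)
          · exact Or.inl h
          · rcases List.mem_cons.mp hs with rfl | hs'
            · exact absurd hnv (pvRA_start hra)
            · exact Or.inr ⟨s, hs', y, hra, hz⟩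
      · have hnv : node ∉ v := fun h => hvn ((PySem.Set.contains_iff v node).mpr h)
        have heq : pvWalkB m (f + 1) (node :: rest) v t =
            pvWalkB m f (rest ++ pvNbrs m node) (PySem.Set.add v node)
              (PySem.Set.update t (pvNbrs m node)) := by
          simp only [pvWalkB, if_neg hvn]
        have hsd : pvV m \ (PySem.Set.add v node).toFinset = (pvV m \ v.toFinset).erase node := by
          ext a
          simp only [Finset.mem_sdiff, Finset.mem_erase, List.mem_toFinset, PySem.Set.mem_add]
          tauto
        have hmemV : node ∈ pvV m \ v.toFinset := by
          simp [pvV, List.mem_toFinset, hnode_vals, hnv]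
        have hpot : pvPot m (PySem.Set.add v node) + (pvNbrs m node).length = pvPot m v := by
          unfold pvPot
          rw [hsd]
          exact Finset.sum_erase_add _ _ hmemV
        have hf' : (rest ++ pvNbrs m node).length + pvPot m (PySem.Set.add v node) < f := by
          simp only [List.length_append, List.length_cons] at hf ⊢; omega
        have hq' : ∀ q ∈ rest ++ pvNbrs m node, q ∈ (PySem.Dict.values m).flatten := by
          intro q hqm
          rcases List.mem_append.mp hqm with h | h
          · exact hq q (by simp [h])
          · exact pvNbrs_subset h
        rw [heq, ih _ _ _ hq' hf' z]
        have hBc : ∀ a, a ∈ PySem.Set.add v node ↔ a ∈ node :: v := by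
          intro a; rw [PySem.Set.mem_add]; simp; tauto
        constructor
        · rintro (h | ⟨s, hs, y, hra, hz⟩)
          · rcases (PySem.Set.mem_update t (pvNbrs m node) z).mp h with ht | hn
            · exact Or.inl ht
            · exact Or.inr ⟨node, by simp, node, pvRA.refl node hnv, hn⟩
          · have hra' : pvRA m v s y :=
              pvRA_mono (fun a ha => (PySem.Set.mem_add v node a).mpr (Or.inl ha)) hra
            rcases List.mem_append.mp hs with hsr | hsn
            · exact Or.inr ⟨s, by simp [hsr], y, hra', hz⟩
            · have hsv : s ∉ v := fun hsv' =>
                (pvRA_start hra) ((PySem.Set.mem_add v node s).mpr (Or.inl hsv'))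
              exact Or.inr ⟨node, by simp, y,
                pvRA_trans (pvRA.tail (pvRA.refl node hnv) hsn hsv) hra', hz⟩
        · rintro (ht | ⟨s, hs, y, hra, hz⟩)
          · exact Or.inl ((PySem.Set.mem_update t (pvNbrs m node) z).mpr (Or.inl ht))
          · rcases pvRA_avoid node hra with heqy | h2 | ⟨d, hd, h2⟩
            · rw [heqy] at hz
              exact Or.inl ((PySem.Set.mem_update t (pvNbrs m node) z).mpr (Or.inr hz))
            · have h2' : pvRA m (PySem.Set.add v node) s y := (pvRA_congr hBc).mpr h2
              rcases List.mem_cons.mp hs with heq | hs'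
              · exact absurd (pvRA_start h2) (by rw [heq]; simp)
              · exact Or.inr ⟨s, List.mem_append.mpr (Or.inl hs'), y, h2', hz⟩
            · exact Or.inr ⟨d, List.mem_append.mpr (Or.inr hd), y,
                (pvRA_congr hBc).mpr h2, hz⟩

-- ===== per-name agreement and the outer fold =====

theorem pvFoldA_mem (m : PySem.Dict String (List String)) :
    ∀ (bs : List String) (acc : PySem.Set String) (z : String),
      z ∈ bs.foldl (fun tb b => PySem.Set.union tb (pvGaA m (pvFuelA m) b PySem.Set.empty).2) acc ↔
      z ∈ acc ∨ ∃ b ∈ bs, z ∈ (pvGaA m (pvFuelA m) b PySem.Set.empty).2 := by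
  intro bs
  induction bs with
  | nil => simp
  | cons b bs ih =>
    intro acc z
    rw [List.foldl_cons, ih, PySem.Set.mem_union]
    constructor
    · rintro ((h | h) | ⟨b', hb', h⟩)
      · exact Or.inl h
      · exact Or.inr ⟨b, by simp, h⟩
      · exact Or.inr ⟨b', by simp [hb'], h⟩
    · rintro (h | ⟨b', hb', h⟩)
      · exact Or.inl (Or.inl h)
      · rcases List.mem_cons.mp hb' with heq | hb''
        · exact Or.inl (Or.inr (heq ▸ h))
        · exact Or.inr ⟨b', hb'', h⟩

theorem pvStep_eq (m : PySem.Dict String (List String)) (name : String) :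
    (let bases := (PySem.Dict.get? m name).getD []
     let tb := bases.foldl
       (fun tb b => PySem.Set.union tb (pvGaA m (pvFuelA m) b PySem.Set.empty).2)
       PySem.Set.empty
     PySem.Dict.insert m name (bases.filter (fun b => !(PySem.Set.contains tb b)))) =
    (let bases := (PySem.Dict.get? m name).getD []
     let tb := pvWalkB m (pvFuelB m bases) bases PySem.Set.empty PySem.Set.empty
     PySem.Dict.insert m name (bases.filter (fun b => !(PySem.Set.contains tb b)))) := by
  show PySem.Dict.insert m name
      (((PySem.Dict.get? m name).getD []).filter (fun b => !(PySem.Set.contains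
        ((((PySem.Dict.get? m name).getD [])).foldl
          (fun tb b => PySem.Set.union tb (pvGaA m (pvFuelA m) b PySem.Set.empty).2)
          PySem.Set.empty) b))) =
    PySem.Dict.insert m name
      (((PySem.Dict.get? m name).getD []).filter (fun b => !(PySem.Set.contains
        (pvWalkB m (pvFuelB m ((PySem.Dict.get? m name).getD []))
          ((PySem.Dict.get? m name).getD []) PySem.Set.empty PySem.Set.empty) b)))
  set bases := (PySem.Dict.get? m name).getD [] with hbases
  set L := ((PySem.Dict.values m).flatten).length with hL
  have hempty : (PySem.Set.empty : PySem.Set String).toFinset = ∅ := by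
    simp [PySem.Set.empty]
  have hbv : ∀ b ∈ bases, b ∈ (PySem.Dict.values m).flatten := by
    intro b hb
    exact pvNbrs_subset (x := name) (by unfold pvNbrs; rw [← hbases]; exact hb)
  have hcondA : ∀ b, ((insert b (pvV m)) \ (PySem.Set.empty : PySem.Set String).toFinset).card
      < pvFuelA m := by
    intro b
    have h1 : ((insert b (pvV m))).card ≤ (pvV m).card + 1 := Finset.card_insert_le _ _
    have h2 : (pvV m).card ≤ L := by rw [hL]; exact List.toFinset_card_le _
    rw [hempty, Finset.sdiff_empty]
    unfold pvFuelA
    rw [← hL]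
    omega
  have hpot : pvPot m PySem.Set.empty ≤ L * L := by
    unfold pvPot
    rw [hempty, Finset.sdiff_empty]
    calc ∑ x ∈ pvV m, (pvNbrs m x).length ≤ (pvV m).card • L :=
          Finset.sum_le_card_nsmul _ _ _ (fun x _ => by rw [hL]; exact pvNbrs_len_le m x)
      _ = (pvV m).card * L := by rw [smul_eq_mul]
      _ ≤ L * L := Nat.mul_le_mul_right _ (by rw [hL]; exact List.toFinset_card_le _)
  have hcondB : bases.length + pvPot m PySem.Set.empty < pvFuelB m bases := by
    unfold pvFuelB
    rw [← hL]
    omega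
  have hTB := pvWalkB_spec m (pvFuelB m bases) bases PySem.Set.empty PySem.Set.empty hbv hcondB
  have hmem : ∀ z, z ∈ bases.foldl
      (fun tb b => PySem.Set.union tb (pvGaA m (pvFuelA m) b PySem.Set.empty).2)
      PySem.Set.empty ↔
      z ∈ pvWalkB m (pvFuelB m bases) bases PySem.Set.empty PySem.Set.empty := by
    intro z
    rw [pvFoldA_mem m bases PySem.Set.empty z, hTB z]
    constructor
    · rintro (h | ⟨b, hb, h⟩)
      · exact absurd h (List.not_mem_nil)
      · obtain ⟨y, hra, hz⟩ :=
          ((pvGaA_spec m (pvFuelA m) b PySem.Set.empty (hcondA b)).2 z).mp h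
        exact Or.inr ⟨b, hb, y, hra, hz⟩
    · rintro (h | ⟨s, hs, y, hra, hz⟩)
      · exact absurd h (List.not_mem_nil)
      · exact Or.inr ⟨s, hs,
          ((pvGaA_spec m (pvFuelA m) s PySem.Set.empty (hcondA s)).2 z).mpr ⟨y, hra, hz⟩⟩
  refine congrArg (PySem.Dict.insert m name) (List.filter_congr ?_)
  intro b _
  have hiff : (PySem.Set.contains (bases.foldl
      (fun tb b => PySem.Set.union tb (pvGaA m (pvFuelA m) b PySem.Set.empty).2)
      PySem.Set.empty) b = true) ↔
      (PySem.Set.contains (pvWalkB m (pvFuelB m bases) bases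
        PySem.Set.empty PySem.Set.empty) b = true) := by
    rw [PySem.Set.contains_iff, PySem.Set.contains_iff]
    exact hmem b
  rcases Bool.eq_false_or_eq_true (PySem.Set.contains (bases.foldl
      (fun tb b => PySem.Set.union tb (pvGaA m (pvFuelA m) b PySem.Set.empty).2)
      PySem.Set.empty) b) with hA | hA <;>
    rcases Bool.eq_false_or_eq_true (PySem.Set.contains (pvWalkB m (pvFuelB m bases) bases
      PySem.Set.empty PySem.Set.empty) b) with hB | hB <;>
    rw [hA, hB] at hiff ⊢ <;> simp_all

-- ===== VERDICT (by name: the statement is the Claim_ definition above) =====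
theorem detect_and_fix_mro_issues_spec : Claim_equal_detect_and_fix_mro_issues := by
  intro no_code_model _
  unfold Spec_detect_and_fix_mro_issues detect_and_fix_mro_issues detect_and_fix_mro_issues_alt
  have hstep : (fun (m : PySem.Dict String (List String)) name =>
      let bases := (PySem.Dict.get? m name).getD []
      let tb := bases.foldl
        (fun tb b => PySem.Set.union tb (pvGaA m (pvFuelA m) b PySem.Set.empty).2)
        PySem.Set.empty
      PySem.Dict.insert m name (bases.filter (fun b => !(PySem.Set.contains tb b)))) =
    (fun (m : PySem.Dict String (List String)) name =>
      let bases := (PySem.Dict.get? m name).getD []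
      let tb := pvWalkB m (pvFuelB m bases) bases PySem.Set.empty PySem.Set.empty
      PySem.Dict.insert m name (bases.filter (fun b => !(PySem.Set.contains tb b)))) := by
    funext m name
    exact pvStep_eq m name
  rw [hstep]
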